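-- pv_equiv track=rewrite | github.com/videoman/mainframe-stuff | generate_ids.py | infer_mask
-- ===== SOURCE A (Python) =====
-- def infer_mask(id_list):
--     """Infer a character mask from a list of example 16-character IDs."""
--     mask = []
--     for chars in zip(*id_list):
--         if len(set(chars)) == 1:
--             mask.append(chars[0])  # Fixed character
--         else:
--             mask.append('?')       # Variable character
--     return ''.join(mask)
-- ===== SOURCE B (Python) =====
-- def infer_mask(id_list):
--     """Infer a character mask from a list of example 16-character IDs."""
--     if not id_list:
--         return ''
--     m = min(len(s) for s in id_list)
--     mask = list(id_list[0][:m])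
--     for s in id_list[1:]:
--         mask = [c if d == c else '?' for c, d in zip(mask, s)]
--     return ''.join(mask)
-- ===== Notes on version B (the rewrite author's own statement) =====
-- stated objective: alternative
-- what changed: Row-wise accumulation: start from the first ID truncated to the minimum length and fold each remaining ID into the mask position by position, instead of transposing the list with zip(*...) and testing each column with a set.
import Mathlib
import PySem

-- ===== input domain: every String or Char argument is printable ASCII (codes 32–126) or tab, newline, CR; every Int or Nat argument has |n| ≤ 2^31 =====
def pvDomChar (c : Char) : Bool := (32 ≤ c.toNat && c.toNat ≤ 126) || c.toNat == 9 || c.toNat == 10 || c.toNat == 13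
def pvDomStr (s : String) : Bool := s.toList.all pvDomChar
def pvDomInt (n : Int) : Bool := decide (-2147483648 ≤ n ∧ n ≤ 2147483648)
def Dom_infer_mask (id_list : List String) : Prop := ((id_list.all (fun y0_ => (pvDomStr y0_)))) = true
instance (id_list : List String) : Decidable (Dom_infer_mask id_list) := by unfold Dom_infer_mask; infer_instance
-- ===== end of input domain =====

-- B folds the IDs row by row into a mask instead of transposing with zip(*...) and testing each column with a set; same cost, different decomposition.

-- ===== PORT A =====
-- zip(*id_list): columns while every current row is nonempty (zip truncates to the shortest)
def pvZipStar (rows : List (List Char)) : List (List Char) :=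
  if h : rows ≠ [] ∧ rows.all (fun r => !r.isEmpty) then
    (rows.map (fun r => r.headD '?')) :: pvZipStar (rows.map List.tail)
  else []
termination_by (rows.headD []).length
decreasing_by
  obtain ⟨h1, h2⟩ := h
  match rows, h1 with
  | r :: rs, _ =>
    simp only [List.all_cons, Bool.and_eq_true, Bool.not_eq_eq_eq_not, Bool.not_true] at h2
    cases r with
    | nil => simp at h2
    | cons a r' => simp

def infer_mask (id_list : List String) : String :=
  let mask := (pvZipStar (id_list.map String.toList)).map
    (fun chars => if (PySem.Set.ofList chars).length = 1 then chars.headD '?' else '?')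
  String.mk mask

-- ===== PORT B =====
def infer_mask_alt (id_list : List String) : String :=
  match id_list with
  | [] => ""
  | first :: rest =>
    let m := ((first :: rest).map (fun s => s.toList.length)).min?.getD 0
    let mask := rest.foldl
      (fun mask s => (mask.zip s.toList).map (fun p => if p.2 = p.1 then p.1 else '?'))
      (first.toList.take m)
    String.mk mask

-- ===== PRECONDITION & SPEC =====
def Spec_infer_mask (id_list : List String) (out : String) : Prop := out = infer_mask_alt id_list
instance (id_list : List String) (out : String) : Decidable (Spec_infer_mask id_list out) := by unfold Spec_infer_mask; infer_instance

-- ===== CLAIM (what is proved, stated in full; the proofs are below) =====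
def Claim_equal_infer_mask : Prop := ∀ (id_list : List String), Dom_infer_mask id_list → Spec_infer_mask id_list (infer_mask id_list)

-- ===== LEMMAS AND PROOFS =====

-- abbreviations used only by the proofs
def pvStep (mask s : List Char) : List Char :=
  (mask.zip s).map (fun p => if p.2 = p.1 then p.1 else '?')

def pvChStep (c : Char) (s : List Char) : Char :=
  if s.headD '?' = c then c else '?'

def pvColChar (chars : List Char) : Char :=
  if (PySem.Set.ofList chars).length = 1 then chars.headD '?' else '?'

theorem pvStep_nil (s : List Char) : pvStep [] s = [] := rfl

theorem pvFold_nil (rs : List (List Char)) : rs.foldl pvStep [] = [] := by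
  induction rs with
  | nil => rfl
  | cons a rs ih => simpa [pvStep_nil] using ih

-- splitting the fold into head column and tail columns
theorem pvFold_split (rs : List (List Char)) (h : Char) (t : List Char)
    (hne : ∀ s ∈ rs, s ≠ []) :
    rs.foldl pvStep (h :: t)
      = (rs.foldl pvChStep h)
        :: ((rs.map List.tail).foldl pvStep t) := by
  induction rs generalizing h t with
  | nil => rfl
  | cons a rs ih =>
    cases a with
    | nil => exact absurd rfl (hne [] (by simp))
    | cons x a' =>
      have : pvStep (h :: t) (x :: a') = (if x = h then h else '?') :: pvStep t a' := rfl
      simp only [List.foldl_cons, this, List.map_cons]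
      rw [ih _ _ (fun s hs => hne s (by simp [hs]))]
      simp only [pvStep, List.tail_cons]
      rfl

theorem pvCharFold_q (rs : List (List Char)) :
    rs.foldl pvChStep '?' = '?' := by
  induction rs with
  | nil => rfl
  | cons a rs ih =>
    rw [List.foldl_cons, show pvChStep '?' a = '?' from ite_self '?']
    exact ih

theorem pvCharFold (rs : List (List Char)) (h : Char) :
    rs.foldl pvChStep h
      = if rs.all (fun s => s.headD '?' == h) then h else '?' := by
  induction rs with
  | nil => simp
  | cons a rs ih =>
    by_cases hx : a.headD '?' = h
    · rw [List.foldl_cons, show pvChStep h a = h from if_pos hx, ih,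
          List.all_cons, show (a.headD '?' == h) = true from beq_iff_eq.mpr hx,
          Bool.true_and]
    · rw [List.foldl_cons, show pvChStep h a = '?' from if_neg hx, pvCharFold_q,
          List.all_cons, show (a.headD '?' == h) = false from beq_eq_false_iff_ne.mpr hx,
          Bool.false_and]
      simp

-- set(chars) has exactly one element iff every char equals the head
theorem pvAdd_len_mono (cs : List Char) (s : PySem.Set Char) :
    s.length ≤ (cs.foldl PySem.Set.add s).length := by
  induction cs generalizing s with
  | nil => simp
  | cons a cs ih =>
    refine le_trans ?_ (ih (PySem.Set.add s a))
    simp [PySem.Set.add]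
    split <;> simp

theorem pvOfList_all (cs : List Char) (h : Char) (hall : ∀ c ∈ cs, c = h) :
    cs.foldl PySem.Set.add [h] = [h] := by
  induction cs with
  | nil => rfl
  | cons a cs ih =>
    have ha : a = h := hall a (by simp)
    have : PySem.Set.add [h] a = [h] := by simp [PySem.Set.add, ha, PySem.Set.contains]
    simpa [this] using ih (fun c hc => hall c (by simp [hc]))

theorem pvOfList_not_all (cs : List Char) (h : Char) (hx : ¬ ∀ c ∈ cs, c = h) :
    2 ≤ (cs.foldl PySem.Set.add [h]).length := by
  induction cs with
  | nil => exact absurd (by simp) hx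
  | cons a cs ih =>
    by_cases ha : a = h
    · have : PySem.Set.add [h] a = [h] := by simp [PySem.Set.add, ha, PySem.Set.contains]
      rw [List.foldl_cons, this]
      refine ih (fun hall => hx ?_)
      intro c hc
      rcases List.mem_cons.mp hc with rfl | hc
      · exact ha
      · exact hall c hc
    · have : PySem.Set.add [h] a = [h, a] := by simp [PySem.Set.add, PySem.Set.contains, ha]
      rw [List.foldl_cons, this]
      exact le_trans (by simp) (pvAdd_len_mono cs [h, a])

theorem pvColChar_cons (h : Char) (cs : List Char) :
    pvColChar (h :: cs) = if cs.all (fun c => c == h) then h else '?' := by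
  have hof : PySem.Set.ofList (h :: cs) = cs.foldl PySem.Set.add [h] := by
    rw [PySem.Set.ofList_eq_foldl]; rfl
  by_cases hall : ∀ c ∈ cs, c = h
  · have hlen : (cs.foldl PySem.Set.add [h]).length = 1 := by
      rw [pvOfList_all cs h hall]; rfl
    unfold pvColChar
    rw [hof, if_pos hlen, List.headD_cons,
        if_pos (by simpa [List.all_eq_true] using hall)]
  · have h2 := pvOfList_not_all cs h hall
    have : ¬ (cs.foldl PySem.Set.add [h]).length = 1 := by omega
    simp only [pvColChar, hof, this, if_false]
    simp only [List.all_eq_true, beq_iff_eq]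
    rw [if_neg hall]

-- arithmetic on the running minimum of lengths
theorem pvFoldMin_le (l : List ℕ) (a : ℕ) : l.foldl min a ≤ a := by
  induction l generalizing a with
  | nil => simp
  | cons x l ih => exact le_trans (ih (min a x)) (by omega)

theorem pvFoldMin_le_mem (l : List ℕ) (a x : ℕ) (hx : x ∈ l) : l.foldl min a ≤ x := by
  induction l generalizing a with
  | nil => simp at hx
  | cons y l ih =>
    rcases List.mem_cons.mp hx with rfl | hx
    · exact le_trans (pvFoldMin_le l (min a x)) (min_le_right a x)
    · rw [List.foldl_cons]
      exact ih (min a y) hx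

theorem pvFoldMin_pos (l : List ℕ) (a : ℕ) (ha : 1 ≤ a) (hl : ∀ x ∈ l, 1 ≤ x) :
    1 ≤ l.foldl min a := by
  induction l generalizing a with
  | nil => simpa
  | cons x l ih =>
    exact ih (min a x) (le_min ha (hl x (by simp))) (fun y hy => hl y (by simp [hy]))

theorem pvFoldMin_pred (l : List ℕ) (a : ℕ) :
    (l.map (fun x => x - 1)).foldl min (a - 1) = l.foldl min a - 1 := by
  induction l generalizing a with
  | nil => rfl
  | cons x l ih =>
    simp only [List.map_cons, List.foldl_cons]
    rw [show min (a - 1) (x - 1) = min a x - 1 by omega]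
    exact ih (min a x)

theorem pvMin?_getD (a : ℕ) (l : List ℕ) : ((a :: l).min?).getD 0 = l.foldl min a := by
  induction l generalizing a with
  | nil => rfl
  | cons x l ih =>
    rw [show (a :: x :: l).min? = (min a x :: l).min? from rfl, ih]
    rfl

def pvMinLen (r0 : List Char) (rs : List (List Char)) : ℕ :=
  (rs.map List.length).foldl min r0.length

-- main invariant: A's column masks equal B's row-wise fold
theorem pvMain (r0 : List Char) (rs : List (List Char)) :
    (pvZipStar (r0 :: rs)).map pvColChar
      = rs.foldl pvStep (r0.take (pvMinLen r0 rs)) := by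
  cases hr : r0 with
  | nil =>
    have hm : pvMinLen [] rs = 0 := by
      simpa [pvMinLen] using pvFoldMin_le (rs.map List.length) 0
    rw [pvZipStar]
    simp [hm, pvFold_nil]
  | cons h r0' =>
    by_cases hall : ∀ s ∈ rs, s ≠ []
    · -- every row nonempty: one column peeled off
      have hstep : pvZipStar ((h :: r0') :: rs)
          = (((h :: r0') :: rs).map (fun r => r.headD '?'))
            :: pvZipStar (((h :: r0') :: rs).map List.tail) := by
        rw [pvZipStar]
        rw [dif_pos]
        refine ⟨by simp, ?_⟩
        simp only [List.all_cons, List.all_eq_true, Bool.and_eq_true]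
        exact ⟨by simp, fun s hs => by
          cases s with
          | nil => exact absurd rfl (hall [] hs)
          | cons x s' => simp⟩
      have hm1 : 1 ≤ pvMinLen (h :: r0') rs := by
        refine pvFoldMin_pos _ _ (by simp) ?_
        intro x hx
        simp only [List.mem_map] at hx
        obtain ⟨s, hs, rfl⟩ := hx
        cases s with
        | nil => exact absurd rfl (hall [] hs)
        | cons y s' => simp
      have hmtail : pvMinLen r0' (rs.map List.tail) = pvMinLen (h :: r0') rs - 1 := by
        unfold pvMinLen
        rw [List.map_map]
        have : (List.length ∘ List.tail) = (fun s : List Char => s.length - 1) := by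
          funext s; cases s <;> simp
        rw [this, show (rs.map fun s : List Char => s.length - 1)
            = (rs.map List.length).map (fun x => x - 1) by rw [List.map_map]; rfl]
        simpa using pvFoldMin_pred (rs.map List.length) (h :: r0').length
      have htake : (h :: r0').take (pvMinLen (h :: r0') rs)
          = h :: r0'.take (pvMinLen (h :: r0') rs - 1) := by
        obtain ⟨k, hk⟩ : ∃ k, pvMinLen (h :: r0') rs = k + 1 :=
          ⟨pvMinLen (h :: r0') rs - 1, by omega⟩
        simp [hk]
      rw [hstep, List.map_cons, htake,
          pvFold_split rs h (r0'.take (pvMinLen (h :: r0') rs - 1)) hall]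
      congr 1
      · rw [List.map_cons, pvColChar_cons, pvCharFold]
        congr 1
        rw [List.all_map]
        rfl
      · have := pvMain r0' (rs.map List.tail)
        rw [← hmtail]
        simpa using this
    · -- some later row empty: no columns, mask already empty
      push_neg at hall
      obtain ⟨s, hs, rfl⟩ := hall
      have hm : pvMinLen (h :: r0') rs = 0 := by
        have := pvFoldMin_le_mem (rs.map List.length) (h :: r0').length 0
          (List.mem_map.mpr ⟨[], hs, rfl⟩)
        unfold pvMinLen; omega
      have hz : pvZipStar ((h :: r0') :: rs) = [] := by
        rw [pvZipStar]
        rw [dif_neg]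
        intro ⟨_, h2⟩
        simp only [List.all_eq_true] at h2
        have := h2 [] (by simp [hs])
        simp at this
      rw [hz, hm]
      simp [pvFold_nil]
termination_by r0.length
decreasing_by simp

-- ===== VERDICT (by name: the statement is the Claim_ definition above) =====
theorem infer_mask_spec : Claim_equal_infer_mask := by
  intro id_list _
  show infer_mask id_list = infer_mask_alt id_list
  cases id_list with
  | nil =>
    have hz : pvZipStar ([] : List (List Char)) = [] := by
      rw [pvZipStar]; simp
    simp only [infer_mask, infer_mask_alt, hz, List.map_nil]
    rfl
  | cons first rest =>
    have hmain := pvMain first.toList (rest.map String.toList)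
    have hmin : ((first :: rest).map (fun s => s.toList.length)).min?.getD 0
        = pvMinLen first.toList (rest.map String.toList) := by
      rw [List.map_cons, pvMin?_getD]
      unfold pvMinLen
      rw [List.map_map]
      rfl
    simp only [infer_mask, infer_mask_alt]
    rw [show List.map String.toList (first :: rest)
          = first.toList :: rest.map String.toList from rfl]
    rw [show List.map
          (fun chars => if (PySem.Set.ofList chars).length = 1 then chars.headD '?' else '?')
          (pvZipStar (first.toList :: rest.map String.toList))
        = (pvZipStar (first.toList :: rest.map String.toList)).map pvColChar from rfl]
    rw [hmain, hmin, List.foldl_map]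
    rfl
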